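-- pv_equiv track=rewrite | github.com/laza20/funciones_logicas | normales/cadena_mas_larga.py | verificar_cadena
-- ===== SOURCE A (Python) =====
-- def verificar_cadena(palabra:str):
--     conjunto = set()
--     mayor_conjunto = set()
--     mayor_conteo = 0
--     contador = 0
--     i = 0
--     j = 0
--     while i < len(palabra):
--         letra = palabra[i]
--         if letra in conjunto:
--             j += 1
--             i = j
--             if len(conjunto) > len(mayor_conjunto):
--                 mayor_conteo, contador, mayor_conjunto = _actualizar_conjunto(
--                     contador, mayor_conjunto, conjunto)
--         else:
--             contador += 1
--             conjunto.add(letra)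
--
--         if len(palabra)  == i + 1 and len(conjunto) > len(mayor_conjunto):
--             mayor_conteo, contador, mayor_conjunto = _actualizar_conjunto(
--                 contador, mayor_conjunto, conjunto)
--         i += 1
--
--     return mayor_conteo
--
-- def _actualizar_conjunto(contador:int, mayor_conjunto:set, conjunto:set):
--     mayor_conteo = contador
--     mayor_conjunto = conjunto
--     contador = 0
--     return mayor_conteo, contador, mayor_conjunto
-- ===== SOURCE B (Python) =====
-- def verificar_cadena(palabra: str):
--     # Length of the longest all-distinct prefix: index of the first character
--     # that already occurred earlier, or len(palabra) if all are distinct.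
--     vistos = set()
--     for i in range(len(palabra)):
--         if palabra[i] in vistos:
--             return i
--         vistos.add(palabra[i])
--     return len(palabra)
-- ===== Notes on version B (the rewrite author's own statement) =====
-- stated objective: simpler
-- what changed: A runs a convoluted restart-pointer scan over the whole string whose set-aliasing freezes the answer at the first repeated character; B is a plain single forward scan that returns the index of the first repeat immediately (or the length if all characters are distinct).
import Mathlib
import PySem

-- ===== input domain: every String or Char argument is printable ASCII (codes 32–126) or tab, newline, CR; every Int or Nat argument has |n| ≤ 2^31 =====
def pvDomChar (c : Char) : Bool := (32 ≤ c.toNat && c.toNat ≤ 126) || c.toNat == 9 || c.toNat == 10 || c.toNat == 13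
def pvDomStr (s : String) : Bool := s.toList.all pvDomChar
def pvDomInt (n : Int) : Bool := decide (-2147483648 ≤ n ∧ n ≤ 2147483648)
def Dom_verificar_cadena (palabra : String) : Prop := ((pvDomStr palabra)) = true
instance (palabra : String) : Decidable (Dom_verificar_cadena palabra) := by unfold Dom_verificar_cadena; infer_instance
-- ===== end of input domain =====

-- B replaces A's restart-pointer scan (whose set aliasing freezes the answer at the
-- first repeated character) by a plain forward scan returning at the first repeat;
-- objective: simpler.

-- ===== PORT A =====
-- Python helper _actualizar_conjunto: returns (mayor_conteo, contador, mayor_conjunto).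
-- Its assignment 'mayor_conjunto = conjunto' makes mayor_conjunto an ALIAS of the
-- mutable set conjunto; the caller records that with the flag 'aliasado' below, and
-- every read of len(mayor_conjunto) goes through that flag. Exact model of CPython
-- reference semantics for this program.
def actualizar_conjunto (contador : Int) (mayor_conjunto conjunto : PySem.Set Char) :
    Int × Int × PySem.Set Char :=
  (contador, 0, conjunto)

-- len(mayor_conjunto) under the alias flag
def lenMayor (conjunto mayor_conjunto : PySem.Set Char) (aliasado : Bool) : Nat :=
  if aliasado then conjunto.length else mayor_conjunto.length

-- the while loop of A; fuel only makes the recursion total (len(palabra)+1 always suffices: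
-- once aliased the result is frozen, see lemma loopA_aliased below)
def loopA (l : List Char) (fuel : Nat) (conjunto mayor_conjunto : PySem.Set Char)
    (aliasado : Bool) (mayor_conteo contador : Int) (i j : Nat) : Int :=
  match fuel with
  | 0 => mayor_conteo
  | fuel + 1 =>
    if i < l.length then
      let letra := l.getD i ' '   -- palabra[i]; the guard i < len makes this exact
      let st :=
        if PySem.Set.contains conjunto letra then
          let j := j + 1
          let i := j
          if lenMayor conjunto mayor_conjunto aliasado < conjunto.length then
            let r := actualizar_conjunto contador mayor_conjunto conjunto
            (conjunto, r.2.2, true, r.1, r.2.1, i, j)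
          else (conjunto, mayor_conjunto, aliasado, mayor_conteo, contador, i, j)
        else (PySem.Set.add conjunto letra, mayor_conjunto, aliasado, mayor_conteo,
              contador + 1, i, j)
      match st with
      | (conjunto, mayor_conjunto, aliasado, mayor_conteo, contador, i, j) =>
        if l.length = i + 1 ∧ lenMayor conjunto mayor_conjunto aliasado < conjunto.length then
          let r := actualizar_conjunto contador mayor_conjunto conjunto
          loopA l fuel conjunto r.2.2 true r.1 r.2.1 (i + 1) j
        else
          loopA l fuel conjunto mayor_conjunto aliasado mayor_conteo contador (i + 1) j
    else mayor_conteo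

def verificar_cadena (palabra : String) : Int :=
  loopA palabra.toList (palabra.toList.length + 1)
    PySem.Set.empty PySem.Set.empty false 0 0 0 0

-- ===== PORT B =====
def loopB (l : List Char) (i : Nat) (vistos : PySem.Set Char) : Int :=
  if _h : i < l.length then
    let c := l.getD i ' '
    if PySem.Set.contains vistos c then (i : Int)
    else loopB l (i + 1) (PySem.Set.add vistos c)
  else (l.length : Int)
termination_by l.length - i

def verificar_cadena_alt (palabra : String) : Int :=
  loopB palabra.toList 0 PySem.Set.empty

-- ===== PRECONDITION & SPEC =====
def Spec_verificar_cadena (palabra : String) (out : Int) : Prop := out = verificar_cadena_alt palabra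
instance (palabra : String) (out : Int) : Decidable (Spec_verificar_cadena palabra out) := by unfold Spec_verificar_cadena; infer_instance

-- ===== CLAIM (what is proved, stated in full; the proofs are below) =====
def Claim_equal_verificar_cadena : Prop := ∀ (palabra : String), Dom_verificar_cadena palabra → Spec_verificar_cadena palabra (verificar_cadena palabra)

-- ===== LEMMAS AND PROOFS =====

lemma length_pos_of_contains {s : PySem.Set Char} {c : Char}
    (h : PySem.Set.contains s c = true) : 0 < s.length := by
  rcases s with _ | ⟨a, t⟩
  · simp [PySem.Set.contains] at h
  · simp

lemma length_pos_add (s : PySem.Set Char) (c : Char) : 0 < (PySem.Set.add s c).length := by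
  unfold PySem.Set.add
  split
  · exact length_pos_of_contains (by assumption)
  · simp

-- once mayor_conjunto aliases conjunto, both length tests compare a set with itself
-- and the loop can never change mayor_conteo again
lemma loopA_aliased (l : List Char) (fuel : Nat) :
    ∀ (c mc : PySem.Set Char) (m cont : Int) (i j : Nat),
    loopA l fuel c mc true m cont i j = m := by
  induction fuel with
  | zero => intro c mc m cont i j; rfl
  | succ fuel ih =>
    intro c mc m cont i j
    unfold loopA
    split
    · by_cases hc : PySem.Set.contains c (l.getD i ' ') = true
      · simp only [hc, if_true, lenMayor, lt_irrefl, if_false, if_true]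
        simp [lenMayor, ih]
      · simp only [hc]
        simp [lenMayor, ih]
    · rfl

lemma loopA_phase1 (l : List Char) (fuel : Nat) :
    ∀ (i : Nat) (seen : PySem.Set Char), i < l.length → l.length - i ≤ fuel →
    loopA l fuel seen PySem.Set.empty false 0 (i : Int) i 0 = loopB l i seen := by
  induction fuel with
  | zero => intro i seen hi hf; omega
  | succ fuel ih =>
    intro i seen hi hf
    unfold loopA
    rw [if_pos hi]
    unfold loopB
    rw [dif_pos hi]
    by_cases hc : PySem.Set.contains seen (l.getD i ' ') = true
    · have hpos : 0 < seen.length := length_pos_of_contains hc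
      simp only [hc, if_true]
      have hlm : lenMayor seen PySem.Set.empty false < seen.length := by
        simpa [lenMayor, PySem.Set.empty] using hpos
      rw [if_pos hlm]
      simp only [actualizar_conjunto]
      rw [if_neg (by simp [lenMayor]), loopA_aliased]
    · simp only [hc, Bool.false_eq_true, if_false]
      have hpos : 0 < (PySem.Set.add seen (l.getD i ' ')).length :=
        length_pos_add seen (l.getD i ' ')
      by_cases hend : l.length = i + 1
      · have hlm : lenMayor (PySem.Set.add seen (l.getD i ' ')) PySem.Set.empty false <
            (PySem.Set.add seen (l.getD i ' ')).length := by
          simpa [lenMayor, PySem.Set.empty] using hpos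
        rw [if_pos ⟨hend, hlm⟩]
        simp only [actualizar_conjunto]
        rw [loopA_aliased]
        unfold loopB
        rw [dif_neg (by omega)]
        push_cast
        omega
      · rw [if_neg (by intro h; exact hend h.1)]
        have h1 : i + 1 < l.length := by omega
        have := ih (i + 1) (PySem.Set.add seen (l.getD i ' ')) h1 (by omega)
        rw [show ((i : Int) + 1) = ((i + 1 : Nat) : Int) by push_cast; ring]
        exact this

-- ===== VERDICT (by name: the statement is the Claim_ definition above) =====
theorem verificar_cadena_spec : Claim_equal_verificar_cadena := by
  intro palabra _
  unfold Spec_verificar_cadena verificar_cadena verificar_cadena_alt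
  by_cases h0 : palabra.toList.length = 0
  · unfold loopA loopB
    rw [if_neg (by omega), dif_neg (by omega)]
    simp [h0]
  · exact loopA_phase1 palabra.toList (palabra.toList.length + 1) 0 PySem.Set.empty
      (by omega) (by omega)
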